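-- pv_equiv track=rewrite | github.com/Richter3766/baekjoon-algorithm | greedy/1744.py | bindingNegativeNumbers
-- ===== SOURCE A (Python) =====
-- def bindingNegativeNumbers(negativeNumbers):
--     idx = 0
--     size = len(negativeNumbers)
--     bindedNumbers = []
--     while idx < size:
--         if idx < size - 1 and negativeNumbers[idx] <= 0 and negativeNumbers[idx + 1] <= 0:
--             bindedNumbers.append(negativeNumbers[idx] * negativeNumbers[idx + 1])
--             idx += 2
--         else:
--             bindedNumbers.append(negativeNumbers[idx])
--             idx += 1
--     return bindedNumbers
-- ===== SOURCE B (Python) =====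
-- def bindingNegativeNumbers(negativeNumbers):
--     bindedNumbers = []
--     pending = None
--     for x in negativeNumbers:
--         if x <= 0:
--             if pending is None:
--                 pending = x
--             else:
--                 bindedNumbers.append(pending * x)
--                 pending = None
--         else:
--             if pending is not None:
--                 bindedNumbers.append(pending)
--                 pending = None
--             bindedNumbers.append(x)
--     if pending is not None:
--         bindedNumbers.append(pending)
--     return bindedNumbers
-- ===== Notes on version B (the rewrite author's own statement) =====
-- stated objective: alternative
-- what changed: Replaces the index-with-lookahead while loop by a single for-loop state machine keeping one pending non-positive number awaiting its partner, flushed on a positive element or at the end.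
import Mathlib
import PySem

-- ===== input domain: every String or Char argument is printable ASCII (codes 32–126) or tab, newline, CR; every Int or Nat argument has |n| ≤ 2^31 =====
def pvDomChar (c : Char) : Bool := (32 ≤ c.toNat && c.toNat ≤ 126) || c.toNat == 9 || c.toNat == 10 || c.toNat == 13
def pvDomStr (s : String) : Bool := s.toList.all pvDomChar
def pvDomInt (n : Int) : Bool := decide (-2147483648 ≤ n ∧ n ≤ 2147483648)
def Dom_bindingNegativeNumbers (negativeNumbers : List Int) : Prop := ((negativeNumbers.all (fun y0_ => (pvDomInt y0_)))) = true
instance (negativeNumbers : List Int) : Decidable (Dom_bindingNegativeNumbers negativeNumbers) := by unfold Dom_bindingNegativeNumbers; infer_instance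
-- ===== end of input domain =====

-- B replaces A's index-with-lookahead while loop by a one-pass state machine with a `pending` non-positive value (alternative decomposition; same cost).


-- ===== PORT A =====
-- A's while loop: index idx, lookahead at idx+1; indices are always in range, ported with getD.
def bindingNegativeNumbersLoop (xs : List Int) (idx : Nat) (acc : List Int) : List Int :=
  if _h : idx < xs.length then
    if idx < xs.length - 1 ∧ xs.getD idx 0 ≤ 0 ∧ xs.getD (idx + 1) 0 ≤ 0 then
      bindingNegativeNumbersLoop xs (idx + 2) (acc ++ [xs.getD idx 0 * xs.getD (idx + 1) 0])
    else
      bindingNegativeNumbersLoop xs (idx + 1) (acc ++ [xs.getD idx 0])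
  else acc
termination_by xs.length - idx

def bindingNegativeNumbers (negativeNumbers : List Int) : List Int :=
  bindingNegativeNumbersLoop negativeNumbers 0 []

-- ===== PORT B =====
def bindingNegativeNumbersStep (s : List Int × Option Int) (x : Int) : List Int × Option Int :=
  if x ≤ 0 then
    match s.2 with
    | none => (s.1, some x)
    | some p => (s.1 ++ [p * x], none)
  else
    match s.2 with
    | none => (s.1 ++ [x], none)
    | some p => (s.1 ++ [p, x], none)

def bindingNegativeNumbers_alt (negativeNumbers : List Int) : List Int :=
  let s := negativeNumbers.foldl bindingNegativeNumbersStep ([], none)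
  match s.2 with
  | some p => s.1 ++ [p]
  | none => s.1

-- ===== PRECONDITION & SPEC =====
def Spec_bindingNegativeNumbers (negativeNumbers : List Int) (out : List Int) : Prop := out = bindingNegativeNumbers_alt negativeNumbers
instance (negativeNumbers : List Int) (out : List Int) : Decidable (Spec_bindingNegativeNumbers negativeNumbers out) := by unfold Spec_bindingNegativeNumbers; infer_instance

-- ===== CLAIM (what is proved, stated in full; the proofs are below) =====
def Claim_equal_bindingNegativeNumbers : Prop := ∀ (negativeNumbers : List Int), Dom_bindingNegativeNumbers negativeNumbers → Spec_bindingNegativeNumbers negativeNumbers (bindingNegativeNumbers negativeNumbers)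

-- ===== LEMMAS AND PROOFS =====

-- reference pairing function both ports are proved equal to
def pvPair : List Int → List Int
  | [] => []
  | [x] => [x]
  | x :: y :: rest =>
    if x ≤ 0 ∧ y ≤ 0 then x * y :: pvPair rest else x :: pvPair (y :: rest)

theorem loopA_eq_pair (xs : List Int) (idx : Nat) (acc : List Int) :
    bindingNegativeNumbersLoop xs idx acc = acc ++ pvPair (xs.drop idx) := by
  induction idx, acc using bindingNegativeNumbersLoop.induct (xs := xs) with
  | case1 idx acc h hc ih =>
      rw [bindingNegativeNumbersLoop, dif_pos h, if_pos hc, ih]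
      have h1 : idx + 1 < xs.length := by omega
      have hg1 : xs.getD idx 0 = xs[idx] := List.getD_eq_getElem xs 0 h
      have hg2 : xs.getD (idx+1) 0 = xs[idx+1] := List.getD_eq_getElem xs 0 h1
      have hd : xs.drop idx = xs[idx] :: xs[idx+1] :: xs.drop (idx + 2) := by
        rw [List.drop_eq_getElem_cons h, List.drop_eq_getElem_cons h1]
      rw [hg1, hg2] at hc
      rw [hd, pvPair, if_pos ⟨hc.2.1, hc.2.2⟩, hg1, hg2]
      simp
  | case2 idx acc h hc ih =>
      rw [bindingNegativeNumbersLoop, dif_pos h, if_neg hc, ih]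
      have hg1 : xs.getD idx 0 = xs[idx] := List.getD_eq_getElem xs 0 h
      by_cases h1 : idx + 1 < xs.length
      · have hd : xs.drop idx = xs[idx] :: xs[idx+1] :: xs.drop (idx + 2) := by
          rw [List.drop_eq_getElem_cons h, List.drop_eq_getElem_cons h1]
        have hd' : xs.drop (idx+1) = xs[idx+1] :: xs.drop (idx + 2) :=
          List.drop_eq_getElem_cons h1
        have hg2 : xs.getD (idx+1) 0 = xs[idx+1] := List.getD_eq_getElem xs 0 h1
        rw [hg1, hg2] at hc
        have hcc : ¬ (xs[idx] ≤ 0 ∧ xs[idx+1] ≤ 0) := by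
          intro ⟨ha, hb⟩; exact hc ⟨by omega, ha, hb⟩
        rw [hd, hd', pvPair, if_neg hcc, hg1]
        simp
      · have hd : xs.drop idx = [xs[idx]] := by
          rw [List.drop_eq_getElem_cons h, List.drop_eq_nil_of_le (by omega)]
        have hd' : xs.drop (idx + 1) = ([] : List Int) := List.drop_eq_nil_of_le (by omega)
        rw [hd, hd', hg1]
        simp [pvPair]
  | case3 idx acc h =>
      rw [bindingNegativeNumbersLoop, dif_neg h, List.drop_eq_nil_of_le (by omega)]
      simp [pvPair]

def pvFinish (s : List Int × Option Int) : List Int :=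
  match s.2 with
  | some p => s.1 ++ [p]
  | none => s.1

theorem pvPair_cons_pos (y : Int) (rest : List Int) (hy : ¬ y ≤ 0) :
    pvPair (y :: rest) = y :: pvPair rest := by
  cases rest with
  | nil => simp [pvPair]
  | cons z zs => rw [pvPair, if_neg (fun h => hy h.1)]

theorem foldB_eq_pair : ∀ (xs acc : List Int),
    pvFinish (xs.foldl bindingNegativeNumbersStep (acc, none)) = acc ++ pvPair xs
  | [], acc => by simp [pvFinish, pvPair]
  | [x], acc => by
      by_cases hx : x ≤ 0 <;>
        simp [pvPair, bindingNegativeNumbersStep, pvFinish, hx]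
  | x :: y :: rest, acc => by
      by_cases hx : x ≤ 0
      · have s1 : bindingNegativeNumbersStep (acc, none) x = (acc, some x) := by
          simp [bindingNegativeNumbersStep, hx]
        by_cases hy : y ≤ 0
        · have s2 : bindingNegativeNumbersStep (acc, some x) y = (acc ++ [x * y], none) := by
            simp [bindingNegativeNumbersStep, hy]
          rw [List.foldl_cons, s1, List.foldl_cons, s2, foldB_eq_pair rest,
            pvPair, if_pos ⟨hx, hy⟩]
          simp
        · have s2 : bindingNegativeNumbersStep (acc, some x) y = (acc ++ [x, y], none) := by
            simp [bindingNegativeNumbersStep, hy]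
          rw [List.foldl_cons, s1, List.foldl_cons, s2, foldB_eq_pair rest,
            pvPair, if_neg (fun h => hy h.2), pvPair_cons_pos y rest hy]
          simp
      · have s1 : bindingNegativeNumbersStep (acc, none) x = (acc ++ [x], none) := by
          simp [bindingNegativeNumbersStep, hx]
        rw [List.foldl_cons, s1, foldB_eq_pair (y :: rest),
          pvPair, if_neg (fun h => hx h.1)]
        simp
termination_by xs => xs.length

-- ===== VERDICT (by name: the statement is the Claim_ definition above) =====
theorem bindingNegativeNumbers_spec : Claim_equal_bindingNegativeNumbers := by
  intro xs _
  show bindingNegativeNumbers xs = bindingNegativeNumbers_alt xs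
  have hb : bindingNegativeNumbers_alt xs = pvFinish (xs.foldl bindingNegativeNumbersStep ([], none)) := rfl
  rw [bindingNegativeNumbers, loopA_eq_pair, hb, foldB_eq_pair]
  simp
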